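-- pv_equiv track=rewrite | github.com/denys-duchier/Scolar | scolars.py | format_prenom
-- ===== SOURCE A (Python) =====
-- def format_prenom(s):
--     "formatte prenom etudiant pour affichage"
--     # XXX locale.setlocale(locale.LC_ALL, ('en_US', 'ISO8859-15') )
--     if not s:
--         return ''
--     frags = s.split()
--     r = []
--     for frag in frags:
--         fs = frag.split('-')
--         r.append( '-'.join( [ x.lower().capitalize() for x in fs ] ) )
--     return ' '.join(r)
-- ===== SOURCE B (Python) =====
-- def format_prenom(s):
--     "formatte prenom etudiant pour affichage"
--     if not s:
--         return ''
--     out = []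
--     pending = False
--     start = True
--     for c in s:
--         if c.isspace():
--             if out:
--                 pending = True
--             start = True
--         else:
--             if pending:
--                 out.append(' ')
--                 pending = False
--             if c == '-':
--                 out.append('-')
--                 start = True
--             else:
--                 out.append(c.upper() if start else c.lower())
--                 start = False
--     return ''.join(out)
-- ===== Notes on version B (the rewrite author's own statement) =====
-- stated objective: alternative
-- what changed: Replaces the split-on-whitespace / split-on-hyphen / capitalize / join pipeline by a single left-to-right character pass maintaining a start-of-token flag and a pending-space flag.
import Mathlib
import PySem

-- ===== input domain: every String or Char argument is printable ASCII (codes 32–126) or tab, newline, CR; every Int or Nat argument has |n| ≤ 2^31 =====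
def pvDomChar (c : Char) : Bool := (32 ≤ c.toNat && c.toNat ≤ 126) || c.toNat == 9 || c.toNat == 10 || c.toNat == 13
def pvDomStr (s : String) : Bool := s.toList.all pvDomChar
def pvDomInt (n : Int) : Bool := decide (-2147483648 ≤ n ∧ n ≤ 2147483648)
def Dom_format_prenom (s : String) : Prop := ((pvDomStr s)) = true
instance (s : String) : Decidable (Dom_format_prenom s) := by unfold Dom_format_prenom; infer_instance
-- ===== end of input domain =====

-- B replaces A's split/capitalize/join pipeline by one character pass with a start-of-token flag (alternative decomposition, same cost).

-- ===== PORT A =====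
-- str.capitalize, ported by hand (exact on ASCII: uppercase first char, lowercase the rest)
def pyCapitalize (cs : List Char) : List Char :=
  match cs with
  | [] => []
  | c :: r => PySem.Chars.upperChar c :: r.map PySem.Chars.lowerChar

-- the loop body: '-'.join([x.lower().capitalize() for x in frag.split('-')])
def wordProc (frag : List Char) : List Char :=
  PySem.Chars.join ['-'] ((PySem.Chars.splitOn frag ['-']).map
    (fun x => pyCapitalize (PySem.Chars.lower x)))

def format_prenom (s : String) : String :=
  if s = "" then ""
  else
    let frags := PySem.Chars.split₀ s.toList
    let r := frags.map wordProc
    String.ofList (PySem.Chars.join [' '] r)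

-- ===== PORT B =====
-- one step of B's loop; state = (out, pending, start)
def altStep (st : List Char × Bool × Bool) (c : Char) : List Char × Bool × Bool :=
  if PySem.Chars.isspace c then
    (st.1, (if st.1.isEmpty then st.2.1 else true), true)
  else
    let out := if st.2.1 then st.1 ++ [' '] else st.1
    if c = '-' then (out ++ ['-'], false, true)
    else (out ++ [if st.2.2 then PySem.Chars.upperChar c else PySem.Chars.lowerChar c], false, false)

def format_prenom_alt (s : String) : String :=
  if s = "" then ""
  else String.ofList (s.toList.foldl altStep ([], false, true)).1

-- ===== PRECONDITION & SPEC =====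
def Spec_format_prenom (s : String) (out : String) : Prop := out = format_prenom_alt s
instance (s : String) (out : String) : Decidable (Spec_format_prenom s out) := by unfold Spec_format_prenom; infer_instance

-- ===== CLAIM (what is proved, stated in full; the proofs are below) =====
def Claim_equal_format_prenom : Prop := ∀ (s : String), Dom_format_prenom s → Spec_format_prenom s (format_prenom s)

-- ===== LEMMAS AND PROOFS =====

-- clean spec of frag.split('-')
def soSpec : List Char → List (List Char)
  | [] => [[]]
  | c :: r => if c = '-' then [] :: soSpec r
              else (c :: (soSpec r).headI) :: (soSpec r).tail

-- B's per-word processing, and the flag after a word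
def procW (b : Bool) : List Char → List Char
  | [] => []
  | c :: r => if c = '-' then '-' :: procW true r
              else (if b then PySem.Chars.upperChar c else PySem.Chars.lowerChar c) :: procW false r

def flagAfter (b : Bool) : List Char → Bool
  | [] => b
  | c :: r => flagAfter (if c = '-' then true else false) r

lemma chle (a c : Char) : (a ≤ c) ↔ a.toNat ≤ c.toNat := by
  rw [Char.le_def, UInt32.le_iff_toNat_le]; rfl

lemma chlits : 'a'.toNat = 97 ∧ 'z'.toNat = 122 ∧ 'A'.toNat = 65 ∧ 'Z'.toNat = 90 := by decide

lemma upperChar_lowerChar (c : Char) :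
    PySem.Chars.upperChar (PySem.Chars.lowerChar c) = PySem.Chars.upperChar c := by
  unfold PySem.Chars.upperChar PySem.Chars.lowerChar PySem.Chars.islower PySem.Chars.isupper
  by_cases h : 'A' ≤ c ∧ c ≤ 'Z'
  · have hn1 : (65 : Nat) ≤ c.toNat := (chle _ _).mp h.1
    have hn2 : c.toNat ≤ 90 := (chle _ _).mp h.2
    have hv : (c.toNat + 32).isValidChar := Or.inl (by omega)
    have ht : (Char.ofNat (c.toNat + 32)).toNat = c.toNat + 32 := by
      rw [Char.toNat_ofNat, if_pos hv]
    have hlo1 : 'a' ≤ Char.ofNat (c.toNat + 32) := by rw [chle]; have := chlits; omega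
    have hlo2 : Char.ofNat (c.toNat + 32) ≤ 'z' := by rw [chle]; have := chlits; omega
    have hnotlow : ¬ ((decide ('a' ≤ c) && decide (c ≤ 'z')) = true) := by
      simp only [Bool.and_eq_true, decide_eq_true_eq, chle]; have := chlits; omega
    simp only [h.1, h.2, hlo1, hlo2, decide_true, Bool.and_self, if_true, ht]
    have he : Char.ofNat (c.toNat + 32 - 32) = c := by simpa using Char.ofNat_toNat c
    rw [he, if_neg hnotlow]
  · have hnot : ¬ ((decide ('A' ≤ c) && decide (c ≤ 'Z')) = true) := by
      simp only [Bool.and_eq_true, decide_eq_true_eq]; exact h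
    rw [if_neg hnot]

lemma lowerChar_lowerChar (c : Char) :
    PySem.Chars.lowerChar (PySem.Chars.lowerChar c) = PySem.Chars.lowerChar c := by
  unfold PySem.Chars.lowerChar PySem.Chars.isupper
  by_cases h : 'A' ≤ c ∧ c ≤ 'Z'
  · have hn1 : (65 : Nat) ≤ c.toNat := (chle _ _).mp h.1
    have hn2 : c.toNat ≤ 90 := (chle _ _).mp h.2
    have hv : (c.toNat + 32).isValidChar := Or.inl (by omega)
    have ht : (Char.ofNat (c.toNat + 32)).toNat = c.toNat + 32 := by
      rw [Char.toNat_ofNat, if_pos hv]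
    have hnot : ¬ ((decide ('A' ≤ Char.ofNat (c.toNat + 32)) && decide (Char.ofNat (c.toNat + 32) ≤ 'Z')) = true) := by
      simp only [Bool.and_eq_true, decide_eq_true_eq, chle]; have := chlits; omega
    simp only [h.1, h.2, decide_true, Bool.and_self, if_true]
    rw [if_neg hnot]
  · have hnot : ¬ ((decide ('A' ≤ c) && decide (c ≤ 'Z')) = true) := by
      simp only [Bool.and_eq_true, decide_eq_true_eq]; exact h
    rw [if_neg hnot, if_neg hnot]

lemma soSpec_ne_nil (l : List Char) : soSpec l ≠ [] := by
  cases l with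
  | nil => simp [soSpec]
  | cons c r => simp [soSpec]; split <;> simp

lemma join_cons_head (sep x : Char) (xs : List Char) (rest : List (List Char)) :
    PySem.Chars.join [sep] ((x :: xs) :: rest) = x :: PySem.Chars.join [sep] (xs :: rest) := by
  cases rest with
  | nil => simp [PySem.Chars.join_singleton]
  | cons y t => rw [PySem.Chars.join_cons_cons, PySem.Chars.join_cons_cons]; simp

lemma join_ne_nil (sep : Char) (x : List Char) (rest : List (List Char)) (h : x ≠ []) :
    PySem.Chars.join [sep] (x :: rest) ≠ [] := by
  obtain ⟨a, as, rfl⟩ := List.exists_cons_of_ne_nil h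
  rw [join_cons_head]; simp

lemma join_append_singleton (sep : Char) (xs : List (List Char)) (y : List Char) :
    PySem.Chars.join [sep] (xs ++ [y]) =
      (if xs = [] then [] else PySem.Chars.join [sep] xs ++ [sep]) ++ y := by
  induction xs with
  | nil => simp [PySem.Chars.join_singleton]
  | cons x t ih =>
    cases t with
    | nil => simp [PySem.Chars.join_cons_cons, PySem.Chars.join_singleton]
    | cons z t' =>
      have step : PySem.Chars.join [sep] ((x :: z :: t') ++ [y]) =
          x ++ [sep] ++ PySem.Chars.join [sep] ((z :: t') ++ [y]) := by
        rw [List.cons_append, List.cons_append, PySem.Chars.join_cons_cons]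
      rw [step, ih]
      simp [PySem.Chars.join_cons_cons]

lemma splitOn_go_spec (l : List Char) :
    ∀ (fuel : Nat) (cur : List Char) (acc : List (List Char)), l.length < fuel →
    PySem.Chars.splitOn.go ['-'] fuel l cur acc =
      acc.reverse ++ (cur.reverse ++ (soSpec l).headI) :: (soSpec l).tail := by
  induction l with
  | nil =>
    intro fuel cur acc hf
    cases fuel with
    | zero => omega
    | succ f => simp [PySem.Chars.splitOn.go, soSpec]
  | cons c r ih =>
    intro fuel cur acc hf
    cases fuel with
    | zero => omega
    | succ f =>
      by_cases hc : c = '-'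
      · have hpre : ['-'].isPrefixOf (c :: r) = true := by simp [List.isPrefixOf, hc]
        simp only [PySem.Chars.splitOn.go, hpre, if_true]
        rw [show List.drop ['-'].length (c :: r) = r by simp]
        rw [ih f [] (cur.reverse :: acc) (by simp at hf; omega)]
        obtain ⟨h0, t0, hst⟩ := List.exists_cons_of_ne_nil (soSpec_ne_nil r)
        simp [soSpec, hc, hst]
      · have hb : ('-' == c) = false := beq_eq_false_iff_ne.mpr (Ne.symm hc)
        have hpre : ['-'].isPrefixOf (c :: r) = false := by
          simp [List.isPrefixOf, hb]
        simp only [PySem.Chars.splitOn.go, hpre, Bool.false_eq_true, if_false]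
        rw [ih f (c :: cur) acc (by simp at hf; omega)]
        simp [soSpec, hc]

lemma splitOn_eq_soSpec (l : List Char) : PySem.Chars.splitOn l ['-'] = soSpec l := by
  unfold PySem.Chars.splitOn
  rw [splitOn_go_spec l (l.length + 1) [] [] (by omega)]
  obtain ⟨h0, t0, hst⟩ := List.exists_cons_of_ne_nil (soSpec_ne_nil l)
  simp [hst]

lemma wordProc_eq_procW_aux (r : List Char) :
    PySem.Chars.join ['-'] ((soSpec r).map (fun x => pyCapitalize (PySem.Chars.lower x))) = procW true r ∧
    PySem.Chars.join ['-'] ((PySem.Chars.lower (soSpec r).headI) :: ((soSpec r).tail.map (fun x => pyCapitalize (PySem.Chars.lower x)))) = procW false r := by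
  induction r with
  | nil => simp [soSpec, procW, PySem.Chars.join_singleton, pyCapitalize, PySem.Chars.lower]
  | cons c r ih =>
    obtain ⟨h0, t0, hst⟩ := List.exists_cons_of_ne_nil (soSpec_ne_nil r)
    rw [hst] at ih
    simp only [List.map_cons, List.headI_cons, List.tail_cons] at ih
    by_cases hc : c = '-'
    · have key : PySem.Chars.join ['-']
          (([] : List Char) :: pyCapitalize (PySem.Chars.lower h0) ::
            t0.map (fun x => pyCapitalize (PySem.Chars.lower x))) = '-' :: procW true r := by
        rw [PySem.Chars.join_cons_cons, ih.1]
        rfl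
      constructor
      · simp only [soSpec, hc, if_true, hst, List.map_cons]
        rw [show pyCapitalize (PySem.Chars.lower []) = [] from rfl]
        rw [key]
        simp [procW, hc]
      · simp only [soSpec, hc, if_true, hst, List.headI_cons, List.tail_cons, List.map_cons]
        rw [show PySem.Chars.lower [] = [] from rfl]
        rw [key]
        simp [procW, hc]
    · have hcap : pyCapitalize (PySem.Chars.lower (c :: h0)) =
          PySem.Chars.upperChar c :: PySem.Chars.lower h0 := by
        simp [pyCapitalize, PySem.Chars.lower, upperChar_lowerChar c, lowerChar_lowerChar]
      have hlow : PySem.Chars.lower (c :: h0) =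
          PySem.Chars.lowerChar c :: PySem.Chars.lower h0 := rfl
      constructor
      · simp only [soSpec, hc, if_false, hst, List.headI_cons, List.tail_cons, List.map_cons]
        rw [hcap, join_cons_head, ih.2]
        simp [procW, hc]
      · simp only [soSpec, hc, if_false, hst, List.headI_cons, List.tail_cons, List.map_cons]
        rw [hlow, join_cons_head, ih.2]
        simp [procW, hc]

lemma wordProc_eq_procW (w : List Char) : wordProc w = procW true w := by
  rw [wordProc, splitOn_eq_soSpec]
  exact (wordProc_eq_procW_aux w).1

lemma procW_length (b : Bool) (w : List Char) : (procW b w).length = w.length := by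
  induction w generalizing b with
  | nil => rfl
  | cons c r ih => simp [procW]; split <;> simp [ih]

lemma flagAfter_append (b : Bool) (w : List Char) (c : Char) :
    flagAfter b (w ++ [c]) = (if c = '-' then true else false) := by
  induction w generalizing b with
  | nil => rfl
  | cons d r ih => simp [flagAfter, ih]

lemma procW_append (b : Bool) (w : List Char) (c : Char) :
    procW b (w ++ [c]) = procW b w ++
      (if c = '-' then ['-']
       else [if flagAfter b w then PySem.Chars.upperChar c else PySem.Chars.lowerChar c]) := by
  induction w generalizing b with
  | nil => simp [procW, flagAfter]; split <;> rfl
  | cons d r ih =>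
    by_cases hd : d = '-' <;> simp [procW, flagAfter, hd, ih]

-- rendering of a list of completed words
def renderWs (ws : List (List Char)) : List Char :=
  PySem.Chars.join [' '] (ws.map wordProc)

lemma renderWs_ne_nil (ws : List (List Char)) (h : ws ≠ []) (hw : ∀ w ∈ ws, w ≠ []) :
    renderWs ws ≠ [] := by
  obtain ⟨x, t, rfl⟩ := List.exists_cons_of_ne_nil h
  unfold renderWs
  rw [List.map_cons]
  apply join_ne_nil
  rw [wordProc_eq_procW]
  have := procW_length true x
  have hx : x ≠ [] := hw x (by simp)
  intro hcon
  rw [hcon] at this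
  exact hx (List.eq_nil_of_length_eq_zero this.symm)

lemma renderWs_append_singleton (ws : List (List Char)) (w : List Char) :
    renderWs (ws ++ [w]) =
      renderWs ws ++ (if ws = [] then [] else [' ']) ++ wordProc w := by
  unfold renderWs
  rw [List.map_append, List.map_singleton, join_append_singleton]
  cases ws with
  | nil => simp [PySem.Chars.join_nil]
  | cons a t => simp

lemma main_inv (cs : List Char) :
    ∀ (cur : List Char) (acc : List (List Char)) (out : List Char) (pending start : Bool),
    (∀ w ∈ acc, w ≠ []) →
    ((cur = [] ∧ out = renderWs acc.reverse ∧ start = true ∧ pending = !out.isEmpty)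
      ∨ (cur ≠ [] ∧
         out = renderWs acc.reverse ++ (if acc = [] then [] else [' ']) ++ procW true cur.reverse ∧
         pending = false ∧ start = flagAfter true cur.reverse)) →
    PySem.Chars.join [' '] ((PySem.Chars.split₀.go cs cur acc).map wordProc) =
      (cs.foldl altStep (out, pending, start)).1 := by
  induction cs with
  | nil =>
    intro cur acc out pending start hacc hinv
    rcases hinv with ⟨hcur, hout, _, _⟩ | ⟨hcur, hout, _, _⟩
    · subst hcur
      simp only [PySem.Chars.split₀.go, List.isEmpty_nil, if_true, List.foldl_nil]
      exact hout.symm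
    · have hne : cur.isEmpty = false := by
        cases cur with | nil => exact absurd rfl hcur | cons a t => rfl
      simp only [PySem.Chars.split₀.go, hne, Bool.false_eq_true, if_false, List.foldl_nil,
        List.reverse_cons]
      rw [show PySem.Chars.join [' '] ((acc.reverse ++ [cur.reverse]).map wordProc) =
            renderWs (acc.reverse ++ [cur.reverse]) from rfl]
      rw [renderWs_append_singleton, wordProc_eq_procW, hout]
      congr 2
      simp
  | cons c rest ih =>
    intro cur acc out pending start hacc hinv
    by_cases hsp : PySem.Chars.isspace c = true
    · rcases hinv with ⟨hcur, hout, hstart, hpending⟩ | ⟨hcur, hout, hpending, hstart⟩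
      · subst hcur
        simp only [PySem.Chars.split₀.go, hsp, if_true, List.isEmpty_nil, List.foldl_cons]
        rw [show altStep (out, pending, start) c =
              (out, (if out.isEmpty then pending else true), true) by
            simp [altStep, hsp]]
        apply ih [] acc out _ true hacc
        left
        refine ⟨rfl, hout, rfl, ?_⟩
        cases h : out.isEmpty <;> simp [h, hpending]
      · have hne : cur.isEmpty = false := by
          cases cur with | nil => exact absurd rfl hcur | cons a t => rfl
        have houtne : out ≠ [] := by
          rw [hout]
          intro hcon
          have h1 := procW_length true cur.reverse
          have : procW true cur.reverse = [] := by
            rcases List.append_eq_nil_iff.mp hcon with ⟨_, h2⟩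
            exact h2
          rw [this] at h1
          exact hcur (by simpa using (List.eq_nil_of_length_eq_zero h1.symm))
        simp only [PySem.Chars.split₀.go, hsp, if_true, hne, Bool.false_eq_true, if_false,
          List.foldl_cons]
        rw [show altStep (out, pending, start) c =
              (out, (if out.isEmpty then pending else true), true) by
            simp [altStep, hsp]]
        apply ih [] (cur.reverse :: acc) out _ true
        · intro w hw
          rcases List.mem_cons.mp hw with rfl | hw'
          · intro hcon
            exact hcur (by simpa using congrArg List.reverse hcon)
          · exact hacc _ hw'
        · left
          refine ⟨rfl, ?_, rfl, ?_⟩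
          · rw [List.reverse_cons, renderWs_append_singleton, wordProc_eq_procW, hout]
            congr 2
            simp
          · have : out.isEmpty = false := by
              cases h : out <;> simp [h] at houtne ⊢
            simp [this]
    · rcases hinv with ⟨hcur, hout, hstart, hpending⟩ | ⟨hcur, hout, hpending, hstart⟩
      · subst hcur hstart hpending
        have hemp : out.isEmpty = true ↔ acc = [] := by
          cases hac : acc with
          | nil => simp [hout, hac, renderWs, PySem.Chars.join_nil]
          | cons a t =>
            have : out ≠ [] := by
              rw [hout]
              apply renderWs_ne_nil
              · simp [hac]
              · intro w hw; exact hacc _ (by simpa using hw)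
            cases h : out <;> simp [h] at this ⊢
        have ho : (if (!out.isEmpty) = true then out ++ [' '] else out) =
            renderWs acc.reverse ++ (if acc = [] then [] else [' ']) := by
          by_cases hac : acc = []
          · have : out.isEmpty = true := hemp.mpr hac
            simp [this, hac, hout, renderWs, PySem.Chars.join_nil]
          · have hfe : out.isEmpty = false := by
              cases h : out.isEmpty with
              | false => rfl
              | true => exact absurd (hemp.mp h) hac
            have hr : renderWs acc.reverse ≠ [] := by
              apply renderWs_ne_nil
              · simp [hac]
              · intro w hw; exact hacc _ (List.mem_reverse.mp hw)
            simp [hfe, hac, hout, hr]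
        simp only [PySem.Chars.split₀.go, hsp, Bool.false_eq_true, if_false, List.foldl_cons]
        by_cases hc : c = '-'
        · subst hc
          have hstep : altStep (out, !out.isEmpty, true) '-' =
              (renderWs acc.reverse ++ (if acc = [] then [] else [' ']) ++ ['-'], false, true) := by
            simp only [altStep, hsp, Bool.false_eq_true, if_false, if_true]
            rw [ho]
          rw [hstep]
          apply ih ['-'] acc _ _ _ hacc
          right
          refine ⟨by simp, ?_, rfl, rfl⟩
          simp [procW]
        · have hstep : altStep (out, !out.isEmpty, true) c =
              (renderWs acc.reverse ++ (if acc = [] then [] else [' ']) ++ [PySem.Chars.upperChar c],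
                false, false) := by
            simp only [altStep, hsp, Bool.false_eq_true, if_false, if_true]
            rw [if_neg hc, ho]
          rw [hstep]
          apply ih [c] acc _ _ _ hacc
          right
          refine ⟨by simp, ?_, rfl, ?_⟩
          · simp [procW, hc]
          · simp [flagAfter, hc]
      · subst hpending hstart
        have hne : cur.isEmpty = false := by
          cases cur with | nil => exact absurd rfl hcur | cons a t => rfl
        simp only [PySem.Chars.split₀.go, hsp, Bool.false_eq_true, if_false, List.foldl_cons]
        by_cases hc : c = '-'
        · subst hc
          have hstep : altStep (out, false, flagAfter true cur.reverse) '-' =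
              (out ++ ['-'], false, true) := by
            simp [altStep, hsp]
          rw [hstep]
          apply ih ('-' :: cur) acc _ _ _ hacc
          right
          refine ⟨by simp, ?_, rfl, ?_⟩
          · rw [hout]
            simp only [List.reverse_cons, procW_append]
            simp
          · simp [List.reverse_cons, flagAfter_append]
        · have hstep : altStep (out, false, flagAfter true cur.reverse) c =
              (out ++ [if flagAfter true cur.reverse then PySem.Chars.upperChar c
                       else PySem.Chars.lowerChar c], false, false) := by
            simp [altStep, hsp, hc]
          rw [hstep]
          apply ih (c :: cur) acc _ _ _ hacc
          right
          refine ⟨by simp, ?_, rfl, ?_⟩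
          · rw [hout]
            simp only [List.reverse_cons, procW_append]
            simp [hc]
          · simp [List.reverse_cons, flagAfter_append, hc]

-- ===== VERDICT (by name: the statement is the Claim_ definition above) =====
theorem format_prenom_spec : Claim_equal_format_prenom := by
  intro s _
  unfold Spec_format_prenom format_prenom format_prenom_alt
  by_cases hs : s = ""
  · simp [hs]
  · simp only [hs, if_false]
    congr 1
    rw [show PySem.Chars.split₀ s.toList = PySem.Chars.split₀.go s.toList [] [] from rfl]
    exact main_inv s.toList [] [] [] false true (by simp)
      (Or.inl ⟨rfl, by simp [renderWs, PySem.Chars.join_nil], rfl, rfl⟩)
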